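-- pv_equiv track=rewrite | github.com/Jinghe-John/AI_project_workflow | process_cn.py | _build_introductory_section
-- ===== SOURCE A (Python) =====
-- def _build_introductory_section(blocks: list[dict]) -> list[dict]:
--     """
--     Pass 3: Promote the first 'title' to 'Title' and merge everything between
--     the first and third title into a single 'Introductory-Part' block.
--     page_footnote items are preserved individually after the Introductory-Part.
--
--     If there is no third title, all remaining blocks become the Introductory-Part.
--     """
--     if not blocks or blocks[0]["type"] != "title":
--         return blocks
--
--     blocks[0]["type"] = "Title"
--
--     # Find indices of the 2nd and 3rd titles
--     title_indices = [i for i, b in enumerate(blocks) if b["type"] == "title"]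
--     second_title_idx = title_indices[0] if title_indices else None
--     third_title_idx  = title_indices[1] if len(title_indices) > 1 else None
--
--     end_of_intro = third_title_idx if third_title_idx is not None else len(blocks)
--
--     intro_texts: list[str] = []
--     footnotes:   list[dict] = []
--
--     for i in range(1, end_of_intro):
--         b = blocks[i]
--         if b["type"] == "page_footnote":
--             footnotes.append(b)
--         else:
--             intro_texts.append(b["content"])
--
--     new_blocks: list[dict] = [blocks[0]]
--
--     if intro_texts:
--         new_blocks.append({
--             "type":    "Introductory-Part",
--             "content": " ".join(intro_texts),
--         })
--
--     new_blocks.extend(footnotes)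
--
--     if third_title_idx is not None:
--         new_blocks.extend(blocks[third_title_idx:])
--
--     return new_blocks
-- ===== SOURCE B (Python) =====
-- def _build_introductory_section(blocks: list[dict]) -> list[dict]:
--     """Single forward scan with early break at the second remaining title."""
--     if not blocks or blocks[0]["type"] != "title":
--         return blocks
--
--     blocks[0]["type"] = "Title"
--
--     intro_texts = []
--     footnotes = []
--     titles_seen = 0
--     third_title_idx = None
--     for i in range(1, len(blocks)):
--         b = blocks[i]
--         if b["type"] == "title":
--             titles_seen += 1
--             if titles_seen == 2:
--                 third_title_idx = i
--                 break
--         if b["type"] == "page_footnote":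
--             footnotes.append(b)
--         else:
--             intro_texts.append(b["content"])
--
--     new_blocks = [blocks[0]]
--     if intro_texts:
--         new_blocks.append({"type": "Introductory-Part", "content": " ".join(intro_texts)})
--     new_blocks.extend(footnotes)
--     if third_title_idx is not None:
--         new_blocks.extend(blocks[third_title_idx:])
--     return new_blocks
-- ===== Notes on version B (the rewrite author's own statement) =====
-- stated objective: alternative
-- what changed: B fuses A's three passes (the enumerate comprehension collecting all title indices, the range loop over the intro region, and the final slice bookkeeping) into a single forward scan that keeps a title counter and breaks at the second remaining title, so blocks after the intro region are never classified.
import Mathlib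
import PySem

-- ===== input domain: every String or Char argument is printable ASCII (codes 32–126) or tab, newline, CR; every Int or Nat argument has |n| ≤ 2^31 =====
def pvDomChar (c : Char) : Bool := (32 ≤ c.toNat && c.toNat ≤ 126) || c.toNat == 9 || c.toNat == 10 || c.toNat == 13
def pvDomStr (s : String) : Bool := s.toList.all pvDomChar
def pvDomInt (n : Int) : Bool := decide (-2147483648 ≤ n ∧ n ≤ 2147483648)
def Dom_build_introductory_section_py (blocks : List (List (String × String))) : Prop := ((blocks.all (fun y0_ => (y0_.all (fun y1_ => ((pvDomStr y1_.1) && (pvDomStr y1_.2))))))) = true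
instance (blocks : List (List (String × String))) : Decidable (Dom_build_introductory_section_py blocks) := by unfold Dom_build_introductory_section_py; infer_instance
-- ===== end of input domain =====

-- B fuses A's three passes (enumerate-comprehension for title indices, the range
-- loop collecting intro texts/footnotes, then slicing) into ONE forward scan with a
-- title counter and an early break at the second remaining title; same return value.
-- Both Pythons mutate blocks[0]["type"] in place identically; the theorems here are
-- about the RETURN value.

-- b["type"] / b["content"] as Python reads them, with "" where the key is absent
-- (Pre_ below excludes every input on which the Python would raise KeyError).
def pvTp (b : List (String × String)) : String := ((PySem.Dict.mk b).get? "type").getD ""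
def pvCt (b : List (String × String)) : String := ((PySem.Dict.mk b).get? "content").getD ""

-- ===== PORT A =====
def build_introductory_section_py (blocks : List (List (String × String))) : List (List (String × String)) :=
  match blocks with
  | [] => []
  | b0 :: rest =>
    if pvTp b0 ≠ "title" then b0 :: rest
    else
      let b0' := ((PySem.Dict.mk b0).insert "type" "Title").items
      let blocks' := b0' :: rest
      let title_indices := (PySem.List.enumerate blocks').filterMap
        (fun p => if pvTp p.2 = "title" then some p.1 else none)
      let _second_title_idx := title_indices[0]?
      let third_title_idx := title_indices[1]?
      let end_of_intro : Int := match third_title_idx with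
        | some i => i
        | none => (blocks'.length : Int)
      let acc := (PySem.List.pyRange 1 end_of_intro).foldl
        (fun acc i =>
          let b := PySem.List.pyGetD blocks' i []
          if pvTp b = "page_footnote" then (acc.1, acc.2 ++ [b])
          else (acc.1 ++ [pvCt b], acc.2))
        (([], []) : List String × List (List (String × String)))
      let new_blocks := [b0']
      let new_blocks := if acc.1 ≠ [] then
          new_blocks ++ [[("type", "Introductory-Part"), ("content", PySem.Str.join " " acc.1)]]
        else new_blocks
      let new_blocks := new_blocks ++ acc.2
      match third_title_idx with
      | some i => new_blocks ++ PySem.List.slice blocks' (some i) none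
      | none => new_blocks

-- ===== PORT B =====
-- the fused scan of Source B: index i, counter of titles seen; stops at the second title
def pvScanB : List (List (String × String)) → Nat → Nat →
    List String × List (List (String × String)) × Option Nat
  | [], _, _ => ([], [], none)
  | b :: rest, i, titles_seen =>
    if pvTp b = "title" ∧ titles_seen + 1 = 2 then ([], [], some i)
    else
      let seen' := if pvTp b = "title" then titles_seen + 1 else titles_seen
      let r := pvScanB rest (i + 1) seen'
      if pvTp b = "page_footnote" then (r.1, b :: r.2.1, r.2.2)
      else (pvCt b :: r.1, r.2.1, r.2.2)

def build_introductory_section_py_alt (blocks : List (List (String × String))) : List (List (String × String)) :=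
  match blocks with
  | [] => []
  | b0 :: rest =>
    if pvTp b0 ≠ "title" then b0 :: rest
    else
      let b0' := ((PySem.Dict.mk b0).insert "type" "Title").items
      let r := pvScanB rest 1 0
      [b0']
        ++ (if r.1 ≠ [] then
              [[("type", "Introductory-Part"), ("content", PySem.Str.join " " r.1)]]
            else [])
        ++ r.2.1
        ++ (match r.2.2 with
            | some i => (b0' :: rest).drop i
            | none => [])

-- ===== PRECONDITION & SPEC =====
-- positions of the blocks whose "type" is "title" (used only to state where A reads "content")
def pvTIdx : List (List (String × String)) → List Nat
  | [] => []
  | b :: r => if pvTp b = "title" then 0 :: (pvTIdx r).map (· + 1) else (pvTIdx r).map (· + 1)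

-- Exactly the inputs on which the Python A returns (no KeyError): the head block has a
-- "type" key, and — when it is a title — every block has a "type" key and every
-- non-footnote block before the second remaining title has a "content" key.
def Pre_build_introductory_section_py (blocks : List (List (String × String))) : Prop :=
  blocks = [] ∨
    (((PySem.Dict.mk (blocks.headD [])).get? "type").isSome ∧
     (pvTp (blocks.headD []) = "title" →
       (∀ b ∈ blocks.tail, ((PySem.Dict.mk b).get? "type").isSome) ∧
       (∀ b ∈ blocks.tail.take ((pvTIdx blocks.tail)[1]?.getD blocks.tail.length),
         pvTp b = "page_footnote" ∨ ((PySem.Dict.mk b).get? "content").isSome)))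
instance (blocks : List (List (String × String))) : Decidable (Pre_build_introductory_section_py blocks) := by
  unfold Pre_build_introductory_section_py; infer_instance

def pvWitness_build_introductory_section_py : (List (List (String × String))) :=
  [[("type", "title"), ("content", "Doc")],
   [("type", "text"), ("content", "hello")],
   [("type", "page_footnote"), ("content", "fn")],
   [("type", "title"), ("content", "sec1")],
   [("type", "title"), ("content", "sec2")],
   [("type", "text"), ("content", "body")]]

def Spec_build_introductory_section_py (blocks : List (List (String × String))) (out : List (List (String × String))) : Prop := out = build_introductory_section_py_alt blocks
instance (blocks : List (List (String × String))) (out : List (List (String × String))) : Decidable (Spec_build_introductory_section_py blocks out) := by unfold Spec_build_introductory_section_py; infer_instance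

-- ===== CLAIM (what is proved, stated in full; the proofs are below) =====
def Claim_equal_build_introductory_section_py : Prop := ∀ (blocks : List (List (String × String))), Dom_build_introductory_section_py blocks → Pre_build_introductory_section_py blocks → Spec_build_introductory_section_py blocks (build_introductory_section_py blocks)

-- ===== LEMMAS AND PROOFS =====

-- A's enumerate-comprehension computes pvTIdx shifted by the enumeration start
theorem pv_enumerate_titles (l : List (List (String × String))) :
    ∀ kn : Nat, (PySem.List.enumerate l (kn : Int)).filterMap
        (fun p => if pvTp p.2 = "title" then some p.1 else none)
      = (pvTIdx l).map (fun x => Int.ofNat (x + kn)) := by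
  induction l with
  | nil => intro kn; simp [pvTIdx, PySem.List.enumerate]
  | cons b r ih =>
    intro kn
    simp only [PySem.List.enumerate, List.filterMap_cons, pvTIdx]
    rw [show (kn : Int) + 1 = ((kn + 1 : Nat) : Int) by push_cast; ring, ih (kn + 1)]
    by_cases h : pvTp b = "title" <;>
      simp [h, List.map_map, Function.comp_def, Int.ofNat_eq_natCast] <;>
      · intro a _; omega

-- every title position lies inside the list
theorem pv_tIdx_lt (l : List (List (String × String))) : ∀ i ∈ pvTIdx l, i < l.length := by
  induction l with
  | nil => simp [pvTIdx]
  | cons b r ih =>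
    intro i hi
    simp only [pvTIdx] at hi
    by_cases h : pvTp b = "title" <;> simp [h] at hi <;> simp
    · rcases hi with rfl | ⟨j, hj, rfl⟩
      · omega
      · have := ih _ hj; omega
    · obtain ⟨j, hj, rfl⟩ := hi; have := ih _ hj; omega

-- the first block after the in-place promotion carries type "Title"
theorem pv_tp_promoted (b0 : List (String × String)) :
    pvTp ((PySem.Dict.mk b0).insert "type" "Title").items = "Title" := by
  show (((PySem.Dict.mk ((PySem.Dict.mk b0).insert "type" "Title").items).get? "type").getD "") = "Title"
  rw [show PySem.Dict.mk ((PySem.Dict.mk b0).insert "type" "Title").items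
        = (PySem.Dict.mk b0).insert "type" "Title" from rfl]
  rw [PySem.Dict.get?_insert_self]; rfl

-- 'for i in range(a, b): b = xs[i]' over in-range indices is a fold over the slice
theorem pv_foldl_range_get {β : Type} (xs : List (List (String × String))) (a b : Nat)
    (f : β → List (String × String) → β) (init : β) (hb : b ≤ xs.length) :
    (PySem.List.pyRange (a : Int) (b : Int)).foldl
      (fun acc i => f acc (PySem.List.pyGetD xs i [])) init
      = ((xs.take b).drop a).foldl f init := by
  induction h : b - a generalizing a init with
  | zero =>
    rw [PySem.List.pyRange_one_eq_nil (by omega : (b : Int) ≤ (a : Int))]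
    rw [List.drop_eq_nil_of_le (by simp; omega)]; rfl
  | succ n ih =>
    have hab : a < b := by omega
    have halen : a < xs.length := by omega
    rw [PySem.List.pyRange_one_cons (by exact_mod_cast hab)]
    have hget : PySem.List.pyGetD xs (a : Int) [] = xs[a] := by
      rw [PySem.List.pyGetD_natCast]; simp [halen]
    have hlt : a < (xs.take b).length := by simp; omega
    rw [List.drop_eq_getElem_cons hlt]
    simp only [List.foldl_cons, hget, List.getElem_take]
    have : ((a : Int) + 1) = ((a + 1 : Nat) : Int) := by push_cast; ring
    rw [this, ih (a + 1) (f init xs[a]) (by omega)]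

-- A's collection loop, solved
theorem pv_collect (l : List (List (String × String))) :
    ∀ (p : List String) (q : List (List (String × String))),
    l.foldl (fun acc b => if pvTp b = "page_footnote" then (acc.1, acc.2 ++ [b])
                          else (acc.1 ++ [pvCt b], acc.2)) (p, q)
      = (p ++ (l.filter (fun b => !(pvTp b == "page_footnote"))).map pvCt,
         q ++ l.filter (fun b => pvTp b == "page_footnote")) := by
  induction l with
  | nil => simp
  | cons b r ih =>
    intro p q
    by_cases h : pvTp b = "page_footnote" <;> simp [h, List.foldl_cons, ih]

-- A's range loop from index 1, combined with the collection step
theorem pv_loopA (xs : List (List (String × String))) (e : Nat) (he : e ≤ xs.length) :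
    (PySem.List.pyRange 1 (e : Int)).foldl
      (fun acc i =>
        if pvTp (PySem.List.pyGetD xs i []) = "page_footnote" then
          (acc.1, acc.2 ++ [PySem.List.pyGetD xs i []])
        else (acc.1 ++ [pvCt (PySem.List.pyGetD xs i [])], acc.2))
      (([], []) : List String × List (List (String × String)))
    = ((((xs.take e).drop 1).filter (fun b => !(pvTp b == "page_footnote"))).map pvCt,
       ((xs.take e).drop 1).filter (fun b => pvTp b == "page_footnote")) := by
  have h1 := pv_foldl_range_get xs 1 e
    (fun acc b => if pvTp b = "page_footnote" then (acc.1, acc.2 ++ [b])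
                  else (acc.1 ++ [pvCt b], acc.2)) ([], []) he
  simp only [Nat.cast_one] at h1
  rw [h1, pv_collect]
  simp

-- B's scan after the first title has been counted
theorem pv_scan1 (ts : List (List (String × String))) : ∀ i,
    pvScanB ts i 1 =
      (((ts.take ((pvTIdx ts)[0]?.getD ts.length)).filter (fun b => !(pvTp b == "page_footnote"))).map pvCt,
       (ts.take ((pvTIdx ts)[0]?.getD ts.length)).filter (fun b => pvTp b == "page_footnote"),
       ((pvTIdx ts)[0]?).map (i + ·)) := by
  induction ts with
  | nil => intro i; simp [pvScanB, pvTIdx]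
  | cons b r ih =>
    intro i
    by_cases h : pvTp b = "title"
    · simp [pvScanB, pvTIdx, h]
    · have hm : ((pvTIdx r).map (· + 1))[0]?.getD (r.length + 1)
          = (pvTIdx r)[0]?.getD r.length + 1 := by
        cases hx : (pvTIdx r)[0]? <;> simp [hx]
      by_cases hf : pvTp b = "page_footnote" <;>
        simp [pvScanB, pvTIdx, h, hf, ih (i + 1), List.take_succ_cons] <;>
        · cases hx : (pvTIdx r)[0]? <;> simp <;> omega

-- B's scan from the start
theorem pv_scan0 (ts : List (List (String × String))) : ∀ i,
    pvScanB ts i 0 =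
      (((ts.take ((pvTIdx ts)[1]?.getD ts.length)).filter (fun b => !(pvTp b == "page_footnote"))).map pvCt,
       (ts.take ((pvTIdx ts)[1]?.getD ts.length)).filter (fun b => pvTp b == "page_footnote"),
       ((pvTIdx ts)[1]?).map (i + ·)) := by
  induction ts with
  | nil => intro i; simp [pvScanB, pvTIdx]
  | cons b r ih =>
    intro i
    by_cases h : pvTp b = "title"
    · have hm : (((pvTIdx r).map (· + 1))[0]?).getD (r.length + 1)
          = (pvTIdx r)[0]?.getD r.length + 1 := by
        cases hx : (pvTIdx r)[0]? <;> simp [hx]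
      simp [pvScanB, pvTIdx, h, pv_scan1 r (i + 1), List.take_succ_cons]
      cases hx : (pvTIdx r)[0]? <;> simp <;> omega
    · have hm : ((pvTIdx r).map (· + 1))[1]?.getD (r.length + 1)
          = (pvTIdx r)[1]?.getD r.length + 1 := by
        cases hx : (pvTIdx r)[1]? <;> simp [hx]
      by_cases hf : pvTp b = "page_footnote" <;>
        simp [pvScanB, pvTIdx, h, hf, ih (i + 1), List.take_succ_cons] <;>
        · cases hx : (pvTIdx r)[1]? <;> simp <;> omega

-- the two ports, pointwise
theorem pv_main (blocks : List (List (String × String))) :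
    build_introductory_section_py blocks = build_introductory_section_py_alt blocks := by
  match blocks with
  | [] => rfl
  | b0 :: rest =>
    by_cases h0 : pvTp b0 = "title"
    · have hne : ¬ (pvTp b0 ≠ "title") := by simp [h0]
      simp only [build_introductory_section_py, build_introductory_section_py_alt, if_neg hne]
      rw [show (0 : Int) = ((0 : Nat) : Int) from rfl, pv_enumerate_titles]
      simp only [pvTIdx, pv_tp_promoted, if_neg (by decide : ¬ ("Title" : String) = "title")]
      rw [pv_scan0 rest 1]
      simp only [List.map_map]
      rw [show ((fun x : Nat => Int.ofNat (x + 0)) ∘ fun x : Nat => x + 1) = (fun x : Nat => ((x + 1 : Nat) : Int)) from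
        funext fun x => by simp]
      simp only [List.getElem?_map]
      cases ht : (pvTIdx rest)[1]? with
      | none =>
        simp only [Option.map_none]
        rw [pv_loopA _ (((PySem.Dict.mk b0).insert "type" "Title").items :: rest).length (le_refl _)]
        simp [List.take_succ_cons]
        split <;> simp
      | some j =>
        have hj : j < rest.length := pv_tIdx_lt rest j (List.mem_of_getElem? ht)
        simp only [Option.map_some]
        rw [pv_loopA _ (j + 1) (by simp; omega)]
        simp [List.take_succ_cons]
        rw [show ((j : Int) + 1) = ((j + 1 : Nat) : Int) by push_cast; ring,
          PySem.List.slice_from_natCast, show 1 + j = j + 1 from Nat.add_comm 1 j]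
        split <;> simp
    · show build_introductory_section_py (b0 :: rest) = build_introductory_section_py_alt (b0 :: rest)
      rw [build_introductory_section_py, build_introductory_section_py_alt, if_pos h0, if_pos h0]

-- ===== VERDICT (by name: the statement is the Claim_ definition above) =====
theorem build_introductory_section_py_spec : Claim_equal_build_introductory_section_py := by
  intro blocks _ _
  exact pv_main blocks
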